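-- pv_equiv track=rewrite | github.com/sebiko3/sheldon | scripts/mission-retro.py | summarise_handoffs
-- ===== SOURCE A (Python) =====
-- def summarise_handoffs(handoff_texts: list[str]) -> str:
--     parts: list[str] = []
--     for text in handoff_texts:
--         first_para = text.strip().split("\n\n")[0].strip()
--         if first_para:
--             parts.append(" ".join(first_para.split()))
--     if not parts:
--         return "no worker handoff recorded"
--     return parts[-1][:300]
-- ===== SOURCE B (Python) =====
-- def summarise_handoffs(handoff_texts: list[str]) -> str:
--     for text in reversed(handoff_texts):
--         first_para = text.strip().split("\n\n")[0].strip()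
--         if first_para:
--             return " ".join(first_para.split())[:300]
--     return "no worker handoff recorded"
-- ===== Notes on version B (the rewrite author's own statement) =====
-- stated objective: faster
-- what changed: Replaces forward accumulation of all normalized paragraphs in a list with a stateless reverse early-exit scan that normalizes and returns only the last non-empty handoff.
import Mathlib
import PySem

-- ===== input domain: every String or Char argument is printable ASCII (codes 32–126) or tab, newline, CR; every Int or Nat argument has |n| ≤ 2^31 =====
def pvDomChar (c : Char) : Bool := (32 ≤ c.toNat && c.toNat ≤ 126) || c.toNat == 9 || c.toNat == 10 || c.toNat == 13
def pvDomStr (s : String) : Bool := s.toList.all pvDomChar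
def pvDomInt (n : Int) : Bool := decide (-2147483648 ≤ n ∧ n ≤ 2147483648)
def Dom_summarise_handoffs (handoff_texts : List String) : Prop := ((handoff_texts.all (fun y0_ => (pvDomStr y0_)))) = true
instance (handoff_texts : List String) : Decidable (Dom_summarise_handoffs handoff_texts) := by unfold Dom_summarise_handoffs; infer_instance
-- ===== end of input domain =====

-- B replaces A's forward accumulation into a `parts` list with a stateless
-- reverse early-exit scan (simpler; same return value everywhere).

-- shared transliteration of `text.strip().split("\n\n")[0].strip()`
-- (split with a non-empty separator is always `some` of a non-empty list,
-- so the `.getD` defaults are never taken)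
def pvFirstPara (text : String) : String :=
  PySem.Str.strip (((PySem.List.pyGet? ((PySem.Str.split? (PySem.Str.strip text) "\n\n").getD []) 0)).getD "")

-- ===== PORT A =====
def summarise_handoffs (handoff_texts : List String) : String :=
  let parts : List String := handoff_texts.foldl (fun parts text =>
    let first_para := pvFirstPara text
    if first_para ≠ "" then parts ++ [PySem.Str.join " " (PySem.Str.split₀ first_para)]
    else parts) []
  if parts = [] then "no worker handoff recorded"
  else PySem.Str.slice ((PySem.List.pyGet? parts (-1)).getD "") none (some 300)

-- ===== PORT B =====
def pvAltGo : List String → String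
  | [] => "no worker handoff recorded"
  | text :: rest =>
    let first_para := pvFirstPara text
    if first_para ≠ "" then
      PySem.Str.slice (PySem.Str.join " " (PySem.Str.split₀ first_para)) none (some 300)
    else pvAltGo rest

def summarise_handoffs_alt (handoff_texts : List String) : String :=
  pvAltGo handoff_texts.reverse

-- ===== PRECONDITION & SPEC =====
def Spec_summarise_handoffs (handoff_texts : List String) (out : String) : Prop := out = summarise_handoffs_alt handoff_texts
instance (handoff_texts : List String) (out : String) : Decidable (Spec_summarise_handoffs handoff_texts out) := by unfold Spec_summarise_handoffs; infer_instance

-- ===== CLAIM (what is proved, stated in full; the proofs are below) =====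
def Claim_equal_summarise_handoffs : Prop := ∀ (handoff_texts : List String), Dom_summarise_handoffs handoff_texts → Spec_summarise_handoffs handoff_texts (summarise_handoffs handoff_texts)

-- ===== LEMMAS AND PROOFS =====

theorem pv_eq (handoff_texts : List String) :
    summarise_handoffs handoff_texts = summarise_handoffs_alt handoff_texts := by
  induction handoff_texts using List.reverseRecOn with
  | nil => rfl
  | append_singleton ts t ih =>
    unfold summarise_handoffs summarise_handoffs_alt at *
    simp only [List.foldl_append, List.foldl_cons, List.foldl_nil,
      List.reverse_append, List.reverse_singleton, List.singleton_append, pvAltGo]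
    by_cases h : pvFirstPara t = ""
    · simpa [h] using ih
    · simp [h, PySem.List.pyGet?_neg_one_append_singleton]

-- ===== VERDICT (by name: the statement is the Claim_ definition above) =====
theorem summarise_handoffs_spec : Claim_equal_summarise_handoffs := by
  intro ts _
  exact pv_eq ts
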